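-- pv_equiv track=rewrite | github.com/maximandreychuk/leetcode | 541_reverseStr.py | reverseStr
-- ===== SOURCE A (Python) =====
-- def reverseStr(s, k):
--     start, end, flag, res = 0, k, 2, ""
--     while start < len(s):
--         if flag % 2 == 0:
--             res += s[start:end][::-1]
--             start += k
--             end += k
--             flag+=1
--         else:
--             res += s[start:end]
--             start += k
--             end += k
--             flag+=1
--     return res
-- ===== SOURCE B (Python) =====
-- def reverseStr(s, k):
--     # Per-character index map: output position i takes s[i] unchanged in the
--     # second half of each 2k block, and the mirrored character of its
--     # (possibly short) leading block otherwise. No slicing, no reversal.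
--     n = len(s)
--     chars = []
--     for i in range(n):
--         r = i % (2 * k)
--         if r >= k:
--             chars.append(s[i])
--         else:
--             b = i - r
--             chars.append(s[b + min(k, n - b) - 1 - r])
--     return "".join(chars)
-- ===== Notes on version B (the rewrite author's own statement) =====
-- stated objective: alternative
-- what changed: Replaces A's sequential block loop (parity flag, slicing, slice reversal, string concatenation) by a direct per-character index map: output position i is computed arithmetically from i % (2*k) (identity in the trailing half-block, mirror index b + min(k, n-b) - 1 - (i-b) in the leading half-block), with no slicing or reversal.
import Mathlib
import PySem

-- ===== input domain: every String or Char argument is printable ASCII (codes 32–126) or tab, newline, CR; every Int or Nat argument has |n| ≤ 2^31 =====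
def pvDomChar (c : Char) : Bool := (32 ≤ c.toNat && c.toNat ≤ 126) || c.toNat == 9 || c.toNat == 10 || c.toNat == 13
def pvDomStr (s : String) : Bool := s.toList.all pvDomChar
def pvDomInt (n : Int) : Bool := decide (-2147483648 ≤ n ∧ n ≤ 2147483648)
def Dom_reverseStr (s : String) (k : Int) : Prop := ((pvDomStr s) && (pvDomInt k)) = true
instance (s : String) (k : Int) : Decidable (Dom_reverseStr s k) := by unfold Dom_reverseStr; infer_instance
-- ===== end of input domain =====

-- B computes each output character directly by an arithmetic index map (mirror index inside
-- each leading half-block), with no slicing, no reversal and no block iteration (alternative; same cost).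

-- ===== PORT A =====
-- A's while loop; fuel = len(s)+1 suffices for every input Pre_ admits (k ≥ 1 gives at
-- most len(s) iterations, and for empty s the loop exits at once). s[start:end][::-1] is
-- ported as (slice …).reverse.
def reverseStrLoopA (cs : List Char) (k : Int) : Nat → Int → Int → Int → List Char → List Char
  | 0, _, _, _, res => res
  | fuel + 1, start, stop, flag, res =>
    if start < (cs.length : Int) then
      if PySem.Int.mod flag 2 = 0 then
        reverseStrLoopA cs k fuel (start + k) (stop + k) (flag + 1)
          (res ++ (PySem.List.slice cs (some start) (some stop)).reverse)
      else
        reverseStrLoopA cs k fuel (start + k) (stop + k) (flag + 1)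
          (res ++ PySem.List.slice cs (some start) (some stop))
    else res

def reverseStr (s : String) (k : Int) : String :=
  String.ofList (reverseStrLoopA s.toList k (s.toList.length + 1) 0 k 2 [])

-- ===== PORT B =====
-- the loop body of Source B: the character appended at index i
def pvBChar (cs : List Char) (k : Int) (i : Int) : Char :=
  -- r = i % (2*k); b = i - r; the indices are in range on every admitted input
  if k ≤ PySem.Int.mod i (2 * k) then PySem.List.pyGetD cs i ' '
  else
    PySem.List.pyGetD cs ((i - PySem.Int.mod i (2 * k))
      + min k ((cs.length : Int) - (i - PySem.Int.mod i (2 * k))) - 1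
      - PySem.Int.mod i (2 * k)) ' '

def reverseStr_alt (s : String) (k : Int) : String :=
  String.ofList ((PySem.List.pyRange 0 (s.toList.length : Int) 1).map (pvBChar s.toList k))

-- ===== PRECONDITION & SPEC =====
-- Pre_ excludes k ≤ 0 on nonempty s, where A's while loop never terminates (Python hangs);
-- on empty s both return "" for every k, so only the non-terminating inputs are excluded.
def Pre_reverseStr (s : String) (k : Int) : Prop := 1 ≤ k ∨ s.toList.length = 0
instance (s : String) (k : Int) : Decidable (Pre_reverseStr s k) := by unfold Pre_reverseStr; infer_instance
def pvWitness_reverseStr : String × Int := ("abcdefg", 2)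
def Spec_reverseStr (s : String) (k : Int) (out : String) : Prop := out = reverseStr_alt s k
instance (s : String) (k : Int) (out : String) : Decidable (Spec_reverseStr s k out) := by unfold Spec_reverseStr; infer_instance

-- ===== CLAIM (what is proved, stated in full; the proofs are below) =====
def Claim_equal_reverseStr : Prop := ∀ (s : String) (k : Int), Dom_reverseStr s k → Pre_reverseStr s k → Spec_reverseStr s k (reverseStr s k)

-- ===== LEMMAS AND PROOFS =====

-- one 2k-block's contribution in A: the reversed leading slice and the untouched trailing slice
def pvPair (cs : List Char) (k : Int) (i : Int) : List Char :=
  (PySem.List.slice cs (some i) (some (i + k))).reverse ++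
    PySem.List.slice cs (some (i + k)) (some (i + 2 * k))

lemma pyRange_pos_nil (a b s : Int) (hs : 0 < s) (h : b ≤ a) :
    PySem.List.pyRange a b s = [] := by
  rw [PySem.List.pyRange_of_pos _ _ hs]
  simp [show ¬ a < b by omega]

lemma pyRange_pos_cons (a b s : Int) (hs : 0 < s) (h : a < b) :
    PySem.List.pyRange a b s = a :: PySem.List.pyRange (a + s) b s := by
  rw [PySem.List.pyRange_of_pos _ _ hs, PySem.List.pyRange_of_pos _ _ hs]
  by_cases h2 : a + s < b
  · have hnn : 0 ≤ (b - (a + s) + s - 1) / s := Int.ediv_nonneg (by omega) (by omega)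
    have h1 : ((b - a + s - 1) / s).toNat = ((b - (a + s) + s - 1) / s).toNat + 1 := by
      rw [show b - a + s - 1 = (b - (a + s) + s - 1) + 1 * s from by ring,
        Int.add_mul_ediv_right _ _ (by omega : s ≠ 0)]
      omega
    rw [if_pos h, if_pos h2, h1, List.range_succ_eq_map]
    simp only [List.map_cons, List.map_map]
    congr 1
    · simp
    · apply List.map_congr_left
      intro x _
      simp [Function.comp]
      ring
  · have hq : PySem.Int.floordiv (b - a + s - 1) s = 1 :=
      (PySem.Int.floordiv_eq_iff_of_pos hs).mpr ⟨by omega, by omega⟩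
    rw [PySem.Int.floordiv_eq_ediv_of_pos hs] at hq
    rw [if_pos h, if_neg h2, hq]
    simp

lemma slice_nil_of_ge (cs : List Char) (a b : Int) (h0 : 0 ≤ a) (h0b : 0 ≤ b)
    (h : (cs.length : Int) ≤ a) : PySem.List.slice cs (some a) (some b) = [] := by
  rw [PySem.List.slice_toNat _ h0 h0b, List.drop_eq_nil_iff.mpr (by omega)]
  simp

lemma loopA_eq (cs : List Char) (k : Int) (hk : 1 ≤ k) :
    ∀ (fuel : Nat) (i flag : Int) (res : List Char),
      0 ≤ i → (cs.length : Int) - i ≤ (fuel : Int) → PySem.Int.mod flag 2 = 0 →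
      reverseStrLoopA cs k fuel i (i + k) flag res
        = res ++ (PySem.List.pyRange i (cs.length : Int) (2 * k)).flatMap (pvPair cs k) := by
  intro fuel
  induction fuel using Nat.strong_induction_on with
  | _ fuel IH =>
    intro i flag res hi hfuel hflag
    rcases fuel with _ | f
    · have hge : (cs.length : Int) ≤ i := by omega
      rw [pyRange_pos_nil _ _ _ (by omega) hge]
      simp [reverseStrLoopA]
    · by_cases hlt : i < (cs.length : Int)
      · have hm2 : ¬ PySem.Int.mod (flag + 1) 2 = 0 := by
          rw [PySem.Int.mod_eq_emod_of_pos (by omega)] at hflag ⊢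
          omega
        have hm3 : PySem.Int.mod (flag + 1 + 1) 2 = 0 := by
          rw [PySem.Int.mod_eq_emod_of_pos (by omega)] at hflag ⊢
          omega
        simp only [reverseStrLoopA, if_pos hlt, if_pos hflag]
        rcases f with _ | f'
        · -- fuel exhausted after the reversed block; the loop would exit anyway (len ≤ i + k)
          have hge : (cs.length : Int) ≤ i + k := by omega
          rw [pyRange_pos_cons _ _ _ (by omega) hlt,
            pyRange_pos_nil _ _ _ (by omega) (by omega)]
          simp [reverseStrLoopA, pvPair, slice_nil_of_ge cs (i + k) (i + 2 * k) (by omega) (by omega) hge]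
        · by_cases h2 : i + k < (cs.length : Int)
          · simp only [reverseStrLoopA, if_pos h2, if_neg hm2]
            rw [show i + k + k + k = (i + 2 * k) + k from by ring,
              show i + k + k = i + 2 * k from by ring]
            rw [IH f' (by omega) (i + 2 * k) (flag + 1 + 1) _ (by omega) (by omega) hm3]
            rw [pyRange_pos_cons i _ _ (by omega) hlt]
            simp [pvPair]
          · simp only [reverseStrLoopA, if_neg h2]
            have hge : (cs.length : Int) ≤ i + k := by omega
            rw [pyRange_pos_cons _ _ _ (by omega) hlt,
              pyRange_pos_nil _ _ _ (by omega) (by omega)]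
            simp [pvPair, slice_nil_of_ge cs (i + k) (i + 2 * k) (by omega) (by omega) hge]
      · rw [pyRange_pos_nil _ _ _ (by omega) (by omega)]
        simp [reverseStrLoopA, if_neg hlt]

-- one block of B's per-character map equals one pvPair of A
lemma blockB (cs : List Char) (K : Nat) (hK : 1 ≤ K) (b : Nat) (hdvd : 2 * K ∣ b)
    (hb : b < cs.length) :
    (List.range' b (min (2 * K) (cs.length - b))).map (fun j : Nat => pvBChar cs (K : Int) (j : Int))
      = pvPair cs (K : Int) (b : Int) := by
  set n := cs.length with hn
  set L := min K (n - b) with hL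
  set M := min (2 * K) (n - b) with hM
  have hcongr : ∀ (i j : Nat) (hi : i < cs.length) (hj : j < cs.length), i = j → cs[i] = cs[j] := by
    intro i j hi hj h
    subst h
    rfl
  have hslice1 : PySem.List.slice cs (some (b : Int)) (some ((b : Int) + (K : Int)))
      = (cs.drop b).take K := by
    rw [show ((b : Int) + (K : Int)) = ((b + K : Nat) : Int) by push_cast; ring]
    rw [PySem.List.slice_toNat _ (by positivity) (by positivity)]
    congr 1
    omega
  have hslice2 : PySem.List.slice cs (some ((b : Int) + (K : Int))) (some ((b : Int) + 2 * (K : Int)))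
      = (cs.drop (b + K)).take K := by
    rw [show ((b : Int) + (K : Int)) = ((b + K : Nat) : Int) by push_cast; ring,
      show ((b : Int) + 2 * (K : Int)) = ((b + 2 * K : Nat) : Int) by push_cast; ring]
    rw [PySem.List.slice_toNat _ (by positivity) (by positivity)]
    congr 1
    omega
  have hsplit : List.range' b M = List.range' b L ++ List.range' (b + L) (M - L) := by
    have h := List.range'_append (s := b) (m := L) (n := M - L) (step := 1)
    simp only [one_mul] at h
    rw [h]
    congr 1
    omega
  have hmodval : ∀ t : Nat, t < 2 * K → (b + t) % (2 * K) = t := by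
    intro t ht
    obtain ⟨q, hq⟩ := hdvd
    rw [hq, Nat.add_comm, Nat.add_mul_mod_self_left, Nat.mod_eq_of_lt ht]
  have hmod : ∀ t : Nat, t < 2 * K →
      PySem.Int.mod ((b + t : Nat) : Int) (2 * (K : Int)) = (t : Int) := by
    intro t ht
    rw [show (2 * (K : Int)) = ((2 * K : Nat) : Int) by push_cast; ring,
      PySem.Int.mod_natCast]
    exact_mod_cast congrArg (Nat.cast : Nat → Int) (hmodval t ht)
  unfold pvPair
  rw [hslice1, hslice2, hsplit, List.map_append]
  congr 1
  · -- reversed leading part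
    apply List.ext_getElem
    · simp only [List.length_map, List.length_range', List.length_reverse, List.length_take,
        List.length_drop]
      omega
    · intro t h1 h2
      have htL : t < L := by simpa using h1
      have htK : t < K := by omega
      simp only [List.getElem_map, List.getElem_range', one_mul]
      simp only [pvBChar]
      rw [hmod t (by omega)]
      rw [if_neg (by exact_mod_cast Nat.not_le.mpr htK)]
      have hidx : ((b + t : Nat) : Int) - (t : Int)
          + min (K : Int) ((cs.length : Int) - (((b + t : Nat) : Int) - (t : Int))) - 1 - (t : Int)
          = ((b + L - 1 - t : Nat) : Int) := by
        omega
      rw [hidx, PySem.List.pyGetD_natCast]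
      have hlt : b + L - 1 - t < cs.length := by omega
      rw [List.getD_eq_getElem?_getD, List.getElem?_eq_getElem hlt]
      simp only [Option.getD_some]
      rw [List.getElem_reverse, List.getElem_take, List.getElem_drop]
      exact hcongr _ _ _ _ (by simp only [List.length_take, List.length_drop]; omega)
  · -- untouched trailing part
    apply List.ext_getElem
    · simp only [List.length_map, List.length_range', List.length_take, List.length_drop]
      omega
    · intro t h1 h2
      have htM : t < M - L := by simpa using h1
      have hLK : L = K := by omega
      simp only [List.getElem_map, List.getElem_range', one_mul]
      have hcast : ((b + L + t : Nat) : Int) = ((b + (K + t) : Nat) : Int) := by omega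
      rw [hcast]
      simp only [pvBChar]
      rw [hmod (K + t) (by omega)]
      rw [if_pos (by exact_mod_cast Nat.le_add_right K t)]
      rw [show ((b + (K + t) : Nat) : Int) = (((b + K) + t : Nat) : Int) by omega,
        PySem.List.pyGetD_natCast]
      have hlt : b + K + t < cs.length := by omega
      rw [List.getD_eq_getElem?_getD, List.getElem?_eq_getElem hlt]
      simp only [Option.getD_some]
      rw [List.getElem_take, List.getElem_drop]

-- B's whole map, block by block, equals A's flatMap of pvPair
lemma mapSeg (cs : List Char) (K : Nat) (hK : 1 ≤ K) :
    ∀ (m b : Nat), cs.length - b = m → 2 * K ∣ b →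
      (List.range' b (cs.length - b)).map (fun j : Nat => pvBChar cs (K : Int) (j : Int))
        = (PySem.List.pyRange (b : Int) (cs.length : Int) (2 * (K : Int))).flatMap (pvPair cs (K : Int)) := by
  intro m
  induction m using Nat.strong_induction_on with
  | _ m IH =>
    intro b hm hdvd
    by_cases hb : b < cs.length
    · have h2K : (0 : Int) < 2 * (K : Int) := by positivity
      by_cases h2 : 2 * K < cs.length - b
      · have hsplit : List.range' b (cs.length - b)
            = List.range' b (2 * K) ++ List.range' (b + 2 * K) (cs.length - (b + 2 * K)) := by
          have h := List.range'_append (s := b) (m := 2 * K) (n := cs.length - (b + 2 * K)) (step := 1)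
          simp only [one_mul] at h
          rw [h]
          congr 1
          omega
        rw [hsplit, List.map_append, pyRange_pos_cons _ _ _ h2K (by exact_mod_cast hb),
          List.flatMap_cons]
        congr 1
        · have := blockB cs K hK b hdvd hb
          rwa [show min (2 * K) (cs.length - b) = 2 * K from by omega] at this
        · rw [show ((b : Int) + 2 * (K : Int)) = ((b + 2 * K : Nat) : Int) by push_cast; ring]
          exact IH (cs.length - (b + 2 * K)) (by omega) (b + 2 * K) rfl (dvd_add hdvd dvd_rfl)
      · have hmin : min (2 * K) (cs.length - b) = cs.length - b := by omega
        rw [pyRange_pos_cons _ _ _ h2K (by exact_mod_cast hb),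
          pyRange_pos_nil _ _ _ h2K (by push_cast; omega)]
        rw [List.flatMap_cons, List.flatMap_nil, List.append_nil]
        have := blockB cs K hK b hdvd hb
        rwa [hmin] at this
    · rw [show cs.length - b = 0 from by omega]
      rw [pyRange_pos_nil _ _ _ (by positivity) (by exact_mod_cast (by omega : cs.length ≤ b))]
      simp

-- ===== VERDICT (by name: the statement is the Claim_ definition above) =====
theorem reverseStr_spec : Claim_equal_reverseStr := by
  intro s k _ hpre
  unfold Spec_reverseStr reverseStr reverseStr_alt
  rcases hpre with hk | hlen
  · obtain ⟨K, hKk, hK1⟩ : ∃ K : Nat, k = (K : Int) ∧ 1 ≤ K :=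
      ⟨k.toNat, by omega, by omega⟩
    subst hKk
    congr 1
    have hA := loopA_eq s.toList (K : Int) hk (s.toList.length + 1) 0 2 [] (le_refl 0)
      (by push_cast; omega) (by decide)
    rw [zero_add] at hA
    rw [hA, List.nil_append]
    have hB := mapSeg s.toList K hK1 s.toList.length 0 (by omega) (dvd_zero _)
    simp only [Nat.sub_zero, Nat.cast_zero] at hB
    rw [← hB, PySem.List.pyRange_zero_natCast, List.range_eq_range', List.map_map]
    rfl
  · have hcs : s.toList = [] := List.eq_nil_of_length_eq_zero hlen
    rw [hcs]
    simp [reverseStrLoopA, PySem.List.pyRange]
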